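-- pv_equiv track=rewrite | github.com/GrigorP/Python.-_2021-Python.-Collection-of-exercises_2021-Ben-Stevenson- | Dictionaries (6th)/ex145.py | erudite
-- ===== SOURCE A (Python) =====
-- def erudite(dct: dict , word: str):
--     result = 0
--     while word:
--         for key , values in dct.items():
--             if word[-1].lower() in values:
--                 result += key
--         word = word[:-1]
--     return result
-- ===== SOURCE B (Python) =====
-- def erudite(dct: dict, word: str):
--     # Build once: char -> sum of keys whose value string contains that char.
--     table = {}
--     for key, values in dct.items():
--         for c in set(values):
--             table[c] = table.get(c, 0) + key
--     # One table lookup per word character.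
--     return sum(table.get(ch.lower(), 0) for ch in word)
-- ===== Notes on version B (the rewrite author's own statement) =====
-- stated objective: faster
-- what changed: Instead of rescanning the whole dict for every character of the word, B precomputes a char->summed-keys table in one pass over the dict and then does one hash lookup per word character.
import Mathlib
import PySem

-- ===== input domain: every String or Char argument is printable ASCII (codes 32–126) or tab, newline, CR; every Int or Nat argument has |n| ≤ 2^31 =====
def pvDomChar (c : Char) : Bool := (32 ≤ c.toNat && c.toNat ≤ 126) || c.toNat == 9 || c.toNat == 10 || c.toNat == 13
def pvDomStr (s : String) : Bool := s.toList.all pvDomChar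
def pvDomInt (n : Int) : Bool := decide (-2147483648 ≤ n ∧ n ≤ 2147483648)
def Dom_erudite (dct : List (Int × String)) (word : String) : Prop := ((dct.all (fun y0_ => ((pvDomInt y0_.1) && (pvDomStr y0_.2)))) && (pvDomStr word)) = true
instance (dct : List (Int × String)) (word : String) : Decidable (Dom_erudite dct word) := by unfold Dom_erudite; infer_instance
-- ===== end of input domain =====

-- B precomputes a char→summed-keys table once, then does one lookup per word character (A rescans the dict per character).

-- ===== PORT A =====
-- the 'while word:' loop; each pass reads word[-1] and then sets word = word[:-1]
def eruditeGo (dct : List (Int × String)) (cs : List Char) (result : Int) : Int :=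
  if h : cs ≠ [] then                                    -- 'while word:'
    let c := (PySem.List.pyGet? cs (-1)).getD ' '        -- word[-1] (never the default: cs ≠ [])
    let r := dct.foldl (fun r kv =>
      if PySem.Chars.isIn [PySem.Chars.lowerChar c] kv.2.toList then r + kv.1 else r) result
    eruditeGo dct (PySem.List.slice cs none (some (-1))) r   -- word = word[:-1]
  else result
termination_by cs.length
decreasing_by
  have hpos : 0 < cs.length := List.length_pos_of_ne_nil h
  rw [PySem.List.slice_to_neg_one, List.length_dropLast]
  omega

def erudite (dct : List (Int × String)) (word : String) : Int :=
  eruditeGo dct word.toList 0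

-- ===== PORT B =====
def erudite_alt (dct : List (Int × String)) (word : String) : Int :=
  let table : PySem.Dict Char Int := dct.foldl (fun t kv =>
      (PySem.Set.ofList kv.2.toList).foldl
        (fun t c => t.insert c (t.getD c 0 + kv.1)) t)
    PySem.Dict.empty
  word.toList.foldl (fun s ch => s + table.getD (PySem.Chars.lowerChar ch) 0) 0

-- ===== PRECONDITION & SPEC =====
def Spec_erudite (dct : List (Int × String)) (word : String) (out : Int) : Prop := out = erudite_alt dct word
instance (dct : List (Int × String)) (word : String) (out : Int) : Decidable (Spec_erudite dct word out) := by unfold Spec_erudite; infer_instance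

-- ===== CLAIM (what is proved, stated in full; the proofs are below) =====
def Claim_equal_erudite : Prop := ∀ (dct : List (Int × String)) (word : String), Dom_erudite dct word → Spec_erudite dct word (erudite dct word)

-- ===== LEMMAS AND PROOFS =====
-- the per-character contribution: sum of keys whose value string contains c
def keySum (dct : List (Int × String)) (c : Char) : Int :=
  (dct.map (fun kv => if c ∈ kv.2.toList then kv.1 else 0)).sum

lemma inner_pass (dct : List (Int × String)) (c : Char) (r : Int) :
    dct.foldl (fun r kv =>
      if PySem.Chars.isIn [PySem.Chars.lowerChar c] kv.2.toList then r + kv.1 else r) r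
      = r + keySum dct (PySem.Chars.lowerChar c) := by
  have hcond : ∀ kv : Int × String,
      PySem.Chars.isIn [PySem.Chars.lowerChar c] kv.2.toList
        = decide (PySem.Chars.lowerChar c ∈ kv.2.toList) := by
    intro kv
    by_cases hm : PySem.Chars.lowerChar c ∈ kv.2.toList
    · simp [hm, PySem.Chars.isIn_iff_infix, List.singleton_infix_iff]
    · simp [hm, PySem.Chars.isIn_eq_false_iff, List.singleton_infix_iff]
  have : ∀ r, dct.foldl (fun r kv =>
      if PySem.Chars.isIn [PySem.Chars.lowerChar c] kv.2.toList then r + kv.1 else r) r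
      = dct.foldl (fun r kv =>
          r + (if PySem.Chars.lowerChar c ∈ kv.2.toList then kv.1 else 0)) r := by
    induction dct with
    | nil => intro r; rfl
    | cons kv tl ih =>
        intro r
        simp only [List.foldl_cons, hcond kv]
        rw [ih]
        by_cases hm : PySem.Chars.lowerChar c ∈ kv.2.toList <;> simp [hm]
  rw [this, PySem.List.foldl_add]
  rfl

lemma set_pass (s : List Char) (hnd : s.Nodup) (k : Int) (t : PySem.Dict Char Int) (x : Char) :
    (s.foldl (fun t c => t.insert c (t.getD c 0 + k)) t).getD x 0
      = t.getD x 0 + (if x ∈ s then k else 0) := by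
  induction s generalizing t with
  | nil => simp
  | cons c tl ih =>
      have hnd' : tl.Nodup := (List.nodup_cons.mp hnd).2
      have hcn : c ∉ tl := (List.nodup_cons.mp hnd).1
      simp only [List.foldl_cons]
      rw [ih hnd']
      rw [PySem.Dict.getD_insert]
      by_cases hx : x = c
      · subst hx; simp [hcn]
      · simp [hx, List.mem_cons]

lemma table_getD (dct : List (Int × String)) (t : PySem.Dict Char Int) (x : Char) :
    (dct.foldl (fun t kv =>
        (PySem.Set.ofList kv.2.toList).foldl
          (fun t c => t.insert c (t.getD c 0 + kv.1)) t) t).getD x 0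
      = t.getD x 0 + keySum dct x := by
  induction dct generalizing t with
  | nil => simp [keySum]
  | cons kv tl ih =>
      simp only [List.foldl_cons]
      rw [ih, set_pass _ (PySem.Set.nodup_ofList _) kv.1 t x]
      simp only [PySem.Set.mem_ofList]
      simp [keySum, add_assoc]

lemma go_eq (dct : List (Int × String)) (cs : List Char) (r : Int) :
    eruditeGo dct cs r
      = r + (cs.map (fun c => keySum dct (PySem.Chars.lowerChar c))).sum := by
  induction hn : cs.length using Nat.strong_induction_on generalizing cs r with
  | _ n ih =>
    rcases eq_or_ne cs [] with hcs | hne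
    · subst hcs; rw [eruditeGo]; simp
    · rw [eruditeGo, dif_pos hne]
      simp only [PySem.List.pyGet?_neg_one, List.getLast?_eq_some_getLast hne, Option.getD_some]
      rw [inner_pass]
      have hlen : (PySem.List.slice cs none (some (-1))).length < n := by
        have hpos : 0 < cs.length := List.length_pos_of_ne_nil hne
        rw [PySem.List.slice_to_neg_one, List.length_dropLast]
        omega
      rw [ih _ hlen _ _ rfl, PySem.List.slice_to_neg_one]
      have hsplit : cs = cs.dropLast ++ [cs.getLast hne] := (List.dropLast_append_getLast hne).symm
      calc r + keySum dct (PySem.Chars.lowerChar (cs.getLast hne))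
            + ((cs.dropLast.map (fun c => keySum dct (PySem.Chars.lowerChar c))).sum)
          = r + (((cs.dropLast ++ [cs.getLast hne]).map
              (fun c => keySum dct (PySem.Chars.lowerChar c))).sum) := by
            simp; ring
        _ = r + ((cs.map (fun c => keySum dct (PySem.Chars.lowerChar c))).sum) := by
            rw [← hsplit]

-- ===== VERDICT (by name: the statement is the Claim_ definition above) =====
theorem erudite_spec : Claim_equal_erudite := by
  intro dct word _
  unfold Spec_erudite erudite erudite_alt
  rw [go_eq]
  simp only [table_getD dct PySem.Dict.empty]
  rw [show (fun (s : Int) (ch : Char) => s + (PySem.Dict.empty.getD (PySem.Chars.lowerChar ch) 0 + keySum dct (PySem.Chars.lowerChar ch)))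
        = fun s ch => s + (keySum dct (PySem.Chars.lowerChar ch)) from by
      funext s ch; simp [PySem.Dict.getD_empty]]
  have hfold : ∀ (l : List Char) (a : Int),
      l.foldl (fun s ch => s + keySum dct (PySem.Chars.lowerChar ch)) a
        = a + (l.map (fun c => keySum dct (PySem.Chars.lowerChar c))).sum := by
    intro l
    induction l with
    | nil => intro a; simp
    | cons c tl ih => intro a; simp [ih]; ring
  rw [hfold]
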